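-- pv_equiv track=rewrite | github.com/Brownxin/Algorithm | Recover Rotated Sorted Array.py | recoverRotatedSortedArray
-- ===== SOURCE A (Python) =====
-- def recoverRotatedSortedArray(nums):
--     # write your code here
--     if len(nums)==0 or len(nums)==1:
--         return nums
--     for i in range(0,len(nums)):
--         for j in range(0,len(nums)-1):
--             if nums[j]>nums[j+1]:
--
--                 t=nums[j]
--                 nums[j]=nums[j+1]
--                 nums[j+1]=t
--
--     return nums
-- ===== SOURCE B (Python) =====
-- def recoverRotatedSortedArray(nums):
--     nums.sort()
--     return nums
-- ===== Notes on version B (the rewrite author's own statement) =====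
-- stated objective: faster
-- what changed: Replaces the hand-written bubble sort (nested index loops with adjacent swaps) by the built-in in-place Timsort (nums.sort()).
import Mathlib
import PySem

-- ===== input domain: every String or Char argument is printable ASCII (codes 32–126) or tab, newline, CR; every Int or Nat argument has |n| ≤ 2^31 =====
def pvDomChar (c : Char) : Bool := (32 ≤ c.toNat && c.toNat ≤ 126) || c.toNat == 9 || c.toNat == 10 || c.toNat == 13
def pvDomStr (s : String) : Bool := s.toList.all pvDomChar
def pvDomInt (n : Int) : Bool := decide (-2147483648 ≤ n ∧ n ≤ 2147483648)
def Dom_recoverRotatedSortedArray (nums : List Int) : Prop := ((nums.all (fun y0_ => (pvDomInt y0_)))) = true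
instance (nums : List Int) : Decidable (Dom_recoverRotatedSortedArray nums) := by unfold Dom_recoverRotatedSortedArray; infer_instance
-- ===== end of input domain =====

-- B replaces A's hand-written bubble sort with the built-in sort (nums.sort()); faster (O(n log n)
-- vs O(n^2)); both mutate the argument in place, the theorems are about the return value.

-- ===== PORT A =====
-- Inner loop 'for j in range(0,len(nums)-1): swap adjacent if out of order' as the structural
-- recursion over the same list state (exactly the swaps the index loop performs, in order).
def bubblePass : List Int → List Int
  | a :: b :: rest => if a > b then b :: bubblePass (a :: rest) else a :: bubblePass (b :: rest)
  | xs => xs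

def recoverRotatedSortedArray (nums : List Int) : List Int :=
  if nums.length = 0 ∨ nums.length = 1 then nums
  else (List.range nums.length).foldl (fun acc _ => bubblePass acc) nums

-- ===== PORT B =====
def recoverRotatedSortedArray_alt (nums : List Int) : List Int :=
  PySem.List.sorted nums (fun x => x) false

-- ===== PRECONDITION & SPEC =====
def Spec_recoverRotatedSortedArray (nums : List Int) (out : List Int) : Prop := out = recoverRotatedSortedArray_alt nums
instance (nums : List Int) (out : List Int) : Decidable (Spec_recoverRotatedSortedArray nums out) := by unfold Spec_recoverRotatedSortedArray; infer_instance

-- ===== CLAIM (what is proved, stated in full; the proofs are below) =====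
def Claim_equal_recoverRotatedSortedArray : Prop := ∀ (nums : List Int), Dom_recoverRotatedSortedArray nums → Spec_recoverRotatedSortedArray nums (recoverRotatedSortedArray nums)

-- ===== LEMMAS AND PROOFS =====

theorem bubblePass_perm (xs : List Int) : (bubblePass xs).Perm xs := by
  match xs with
  | [] => simp [bubblePass]
  | [a] => simp [bubblePass]
  | a :: b :: rest =>
    unfold bubblePass
    split
    · exact ((bubblePass_perm (a :: rest)).cons b).trans (List.Perm.swap a b rest)
    · exact (bubblePass_perm (b :: rest)).cons a

-- one pass bubbles a maximum to the end
theorem bubblePass_last_max (xs : List Int) (h : xs ≠ []) :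
    ∃ ys M, bubblePass xs = ys ++ [M] ∧ ∀ y ∈ xs, y ≤ M := by
  match xs with
  | [a] => exact ⟨[], a, by simp [bubblePass], by simp⟩
  | a :: b :: rest =>
    by_cases hab : a > b
    · obtain ⟨ys, M, he, hle⟩ := bubblePass_last_max (a :: rest) (by simp)
      refine ⟨b :: ys, M, by simp [bubblePass, hab, he], ?_⟩
      intro y hy
      simp only [List.mem_cons] at hy
      rcases hy with rfl | rfl | hy
      · exact hle y (by simp)
      · exact le_trans (le_of_lt hab) (hle a (by simp))
      · exact hle y (by simp [hy])
    · obtain ⟨ys, M, he, hle⟩ := bubblePass_last_max (b :: rest) (by simp)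
      refine ⟨a :: ys, M, by simp [bubblePass, hab, he], ?_⟩
      intro y hy
      simp only [List.mem_cons] at hy
      rcases hy with rfl | hy
      · exact le_trans (not_lt.mp hab) (hle b (by simp))
      · exact hle y (by simp [hy])

-- a pass leaves a trailing maximum in place
theorem bubblePass_append_max (ys : List Int) (M : Int) (h : ∀ y ∈ ys, y ≤ M) :
    bubblePass (ys ++ [M]) = bubblePass ys ++ [M] := by
  match ys with
  | [] => simp [bubblePass]
  | [a] => simp [bubblePass, not_lt.mpr (h a (by simp))]
  | a :: b :: rest =>
    by_cases hab : a > b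
    · have hh := bubblePass_append_max (a :: rest) M
        (by intro y hy; refine h y ?_; simp only [List.mem_cons] at hy ⊢; tauto)
      simp only [List.cons_append] at hh ⊢
      simp [bubblePass, hab, hh]
    · have hh := bubblePass_append_max (b :: rest) M
        (by intro y hy; refine h y ?_; simp only [List.mem_cons] at hy ⊢; tauto)
      simp only [List.cons_append] at hh ⊢
      simp [bubblePass, hab, hh]

def passes (n : Nat) (xs : List Int) : List Int := bubblePass^[n] xs

theorem passes_perm (n : Nat) (xs : List Int) : (passes n xs).Perm xs := by
  induction n generalizing xs with
  | zero => simp [passes]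
  | succ k ih =>
    have : passes (k+1) xs = passes k (bubblePass xs) := Function.iterate_succ_apply bubblePass k xs
    exact (this ▸ ih (bubblePass xs)).trans (bubblePass_perm xs)

theorem passes_append_max (n : Nat) (ys : List Int) (M : Int) (h : ∀ y ∈ ys, y ≤ M) :
    passes n (ys ++ [M]) = passes n ys ++ [M] := by
  induction n generalizing ys with
  | zero => simp [passes]
  | succ k ih =>
    have h1 : passes (k+1) (ys ++ [M]) = passes k (bubblePass (ys ++ [M])) :=
      Function.iterate_succ_apply bubblePass k (ys ++ [M])
    have h2 : passes (k+1) ys = passes k (bubblePass ys) :=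
      Function.iterate_succ_apply bubblePass k ys
    rw [h1, h2, bubblePass_append_max ys M h,
        ih (bubblePass ys) (fun y hy => h y ((bubblePass_perm ys).mem_iff.mp hy))]

theorem passes_sorted (n : Nat) (xs : List Int) (h : xs.length ≤ n) :
    (passes n xs).Pairwise (· ≤ ·) := by
  induction n generalizing xs with
  | zero =>
    have : xs = [] := List.length_eq_zero_iff.mp (Nat.le_zero.mp h)
    simp [passes, this]
  | succ k ih =>
    rcases eq_or_ne xs [] with rfl | hne
    · have : passes (k+1) ([] : List Int) = passes k (bubblePass []) :=
        Function.iterate_succ_apply bubblePass k []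
      rw [this, show bubblePass [] = [] by simp [bubblePass]]; exact ih [] (by simp)
    · obtain ⟨ys, M, he, hle⟩ := bubblePass_last_max xs hne
      have hstep : passes (k+1) xs = passes k (bubblePass xs) :=
        Function.iterate_succ_apply bubblePass k xs
      have hylen : ys.length ≤ k := by
        have : (bubblePass xs).length = xs.length := (bubblePass_perm xs).length_eq
        rw [he] at this; simp at this; omega
      have hyle : ∀ y ∈ ys, y ≤ M := by
        intro y hy
        exact hle y ((bubblePass_perm xs).mem_iff.mp (he ▸ List.mem_append_left _ hy))
      rw [hstep, he, passes_append_max k ys M hyle]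
      rw [List.pairwise_append]
      refine ⟨ih ys hylen, by simp, ?_⟩
      intro a ha b hb
      simp at hb; subst hb
      exact hyle a ((passes_perm k ys).mem_iff.mp ha)

theorem foldl_range_eq_passes (n : Nat) (xs : List Int) :
    (List.range n).foldl (fun acc _ => bubblePass acc) xs = passes n xs := by
  induction n generalizing xs with
  | zero => simp [passes]
  | succ k ih =>
    rw [List.range_succ, List.foldl_append, ih, List.foldl_cons, List.foldl_nil]
    exact (Function.iterate_succ_apply' bubblePass k xs).symm

-- ===== VERDICT (by name: the statement is the Claim_ definition above) =====
theorem recoverRotatedSortedArray_spec : Claim_equal_recoverRotatedSortedArray := by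
  intro nums _
  unfold Spec_recoverRotatedSortedArray recoverRotatedSortedArray recoverRotatedSortedArray_alt
  split
  · rename_i h
    rcases h with h | h
    · rw [List.length_eq_zero_iff.mp h]; rfl
    · obtain ⟨a, ha⟩ := List.length_eq_one_iff.mp h
      subst ha
      exact (PySem.List.sorted_eq_self_of_pairwise [a] (fun x => x) (by simp)).symm
  · rw [foldl_range_eq_passes]
    exact (PySem.List.sorted_id_eq_of_perm_of_pairwise nums (passes nums.length nums)
      (passes_perm nums.length nums) (passes_sorted nums.length nums le_rfl)).symm
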